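-- pv_equiv track=rewrite | github.com/H-Wol/algorithmStudy | baekjoon/class3/11403_경로 찾기.py | find_reachable_vertices
-- ===== SOURCE A (Python) =====
-- def find_reachable_vertices(graph, start):
--     n = len(graph)
--     visited = [False] * n
--     reachable = [[0] * n for _ in range(n)]
--
--     def dfs(node):
--         for neighbor in range(n):
--             if graph[node][neighbor] == 1 and not visited[neighbor]:
--                 visited[neighbor] = True
--                 reachable[start][neighbor] = 1
--                 dfs(neighbor)
--
--     dfs(start)
--     return reachable
-- ===== SOURCE B (Python) =====
-- def find_reachable_vertices(graph, start):
--     # Reachability computed as a monotone boolean fixpoint (saturation) of one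
--     # row vector, instead of a graph search: no visited list, no recursion.
--     n = len(graph)
--     reach = [0] * n
--     while True:
--         new = [1 if (reach[j] == 1 or graph[start][j] == 1
--                      or any(reach[i] == 1 and graph[i][j] == 1 for i in range(n)))
--                else 0
--                for j in range(n)]
--         if new == reach:
--             break
--         reach = new
--     result = [[0] * n for _ in range(n)]
--     if result:
--         result[start] = reach
--     return result
-- ===== Notes on version B (the rewrite author's own statement) =====
-- stated objective: alternative
-- what changed: The recursive DFS mutating a shared visited array and matrix is replaced by a monotone boolean fixpoint: one reachability row vector is re-derived from scratch each round (reach[j] already set, direct edge from start, or edge from any already-reached i) until it stabilises, then placed as row start of a zero matrix; no graph search, no visited list, no recursion.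
-- outside the precondition, e.g. on find_reachable_vertices([[0, 0], [0]], 0): A returns [[0, 0], [0, 0]], B returns [[0, 0], [0, 0]]
import Mathlib
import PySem

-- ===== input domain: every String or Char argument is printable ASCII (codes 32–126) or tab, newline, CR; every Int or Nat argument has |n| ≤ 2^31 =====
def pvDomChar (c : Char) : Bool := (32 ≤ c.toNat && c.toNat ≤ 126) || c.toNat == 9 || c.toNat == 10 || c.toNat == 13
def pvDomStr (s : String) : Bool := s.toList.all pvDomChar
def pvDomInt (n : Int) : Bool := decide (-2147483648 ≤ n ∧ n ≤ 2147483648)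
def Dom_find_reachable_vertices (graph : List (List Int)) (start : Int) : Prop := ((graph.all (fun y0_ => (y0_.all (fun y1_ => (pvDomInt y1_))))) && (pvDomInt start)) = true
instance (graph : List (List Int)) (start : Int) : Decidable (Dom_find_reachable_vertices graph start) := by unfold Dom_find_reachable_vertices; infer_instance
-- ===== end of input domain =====

-- B replaces A's recursive DFS by a monotone boolean fixpoint: one reachability row is
-- re-derived from scratch each round until stable, then placed into a zero matrix.

-- ===== PORT A =====
-- Recursive DFS. `fuel` only bounds the recursion depth: every recursive call first marks a
-- previously-unvisited node, so the depth never exceeds n+1 and the initial fuel n+1 is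
-- never exhausted on inputs admitted by Pre_.
def pvDfsA (graph : List (List Int)) (n : Nat) (start : Int) :
    Nat → Int → List Bool × List (List Int) → List Bool × List (List Int)
  | 0, _, st => st
  | fuel+1, node, st =>
      (PySem.List.pyRange 0 (n : Int) 1).foldl (fun st nb =>
        if PySem.List.pyGetD (PySem.List.pyGetD graph node []) nb 0 = 1 ∧
            PySem.List.pyGetD st.1 nb false = false then
          pvDfsA graph n start fuel nb
            (PySem.List.pySetD st.1 nb true,
             PySem.List.pySetD st.2 start
               (PySem.List.pySetD (PySem.List.pyGetD st.2 start []) nb 1))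
        else st) st

def find_reachable_vertices (graph : List (List Int)) (start : Int) : List (List Int) :=
  let n := graph.length
  let visited := List.replicate n false
  let reachable := List.replicate n (List.replicate n (0 : Int))
  (pvDfsA graph n start (n+1) start (visited, reachable)).2

-- ===== PORT B =====
-- Source B: the body of the `while True` loop — one saturation round rebuilding the row.
def pvStepB (g : List (List Int)) (start : Int) (n : Nat) (reach : List Int) : List Int :=
  (List.range n).map (fun j =>
    if reach.getD j 0 = 1 ∨ (PySem.List.pyGetD g start []).getD j 0 = 1 ∨
        ((List.range n).any fun i => reach.getD i 0 == 1 && (g.getD i []).getD j 0 == 1)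
    then (1 : Int) else 0)

-- Source B's `while True: new = …; if new == reach: break; reach = new`.  `fuel` only bounds the
-- number of assignments `reach = new`: each one strictly grows the set of 1-entries of a
-- length-n row, so fuel n+1 is never exhausted (on any input).
def pvFixB (g : List (List Int)) (start : Int) (n : Nat) : Nat → List Int → List Int
  | 0, reach => reach
  | fuel+1, reach =>
      if pvStepB g start n reach = reach then reach
      else pvFixB g start n fuel (pvStepB g start n reach)

def find_reachable_vertices_alt (graph : List (List Int)) (start : Int) : List (List Int) :=
  let n := graph.length
  let reach := pvFixB graph start n (n+1) (List.replicate n (0 : Int))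
  let result := List.replicate n (List.replicate n (0 : Int))
  if result ≠ [] then PySem.List.pySetD result start reach else result

-- ===== PRECONDITION & SPEC =====
-- Pre_ admits the empty graph (A returns [] for any start) and otherwise requires
-- start ∈ [-n, n) (Python's negative indices included) and every row of length ≥ n:
-- outside that A raises IndexError on an out-of-range start or on any too-short row it
-- happens to visit; since whether a short row gets visited depends on the run, this bound
-- also excludes some inputs (a short row that stays unvisited) on which A does return.
def Pre_find_reachable_vertices (graph : List (List Int)) (start : Int) : Prop :=
  graph = [] ∨ (-(graph.length : Int) ≤ start ∧ start < (graph.length : Int) ∧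
    ∀ row ∈ graph, graph.length ≤ row.length)
instance (graph : List (List Int)) (start : Int) : Decidable (Pre_find_reachable_vertices graph start) := by
  unfold Pre_find_reachable_vertices; infer_instance

def pvWitness_find_reachable_vertices : List (List Int) × Int := ([[0, 1], [0, 0]], 0)

def Spec_find_reachable_vertices (graph : List (List Int)) (start : Int) (out : List (List Int)) : Prop := out = find_reachable_vertices_alt graph start
instance (graph : List (List Int)) (start : Int) (out : List (List Int)) : Decidable (Spec_find_reachable_vertices graph start out) := by unfold Spec_find_reachable_vertices; infer_instance

-- ===== CLAIM (what is proved, stated in full; the proofs are below) =====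
def Claim_equal_find_reachable_vertices : Prop := ∀ (graph : List (List Int)) (start : Int), Dom_find_reachable_vertices graph start → Pre_find_reachable_vertices graph start → Spec_find_reachable_vertices graph start (find_reachable_vertices graph start)

-- ===== LEMMAS AND PROOFS =====
def pvE (g : List (List Int)) (n : Nat) (a b : Nat) : Prop :=
  (g.getD a []).getD b 0 = 1 ∧ b < n
def pvDfsV (g : List (List Int)) (n : Nat) : Nat → Nat → List Bool → List Bool
  | 0, _, V => V
  | fuel+1, m, V =>
      (List.range n).foldl (fun V k =>
        if (g.getD m []).getD k 0 = 1 ∧ V.getD k false = false then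
          pvDfsV g n fuel k (V.set k true)
        else V) V
def pvVle (V W : List Bool) : Prop := List.Forall₂ (fun a b : Bool => a = true → b = true) V W
theorem pvVle_refl (V : List Bool) : pvVle V V := (List.forall₂_same).2 (fun _ _ h => h)
theorem pvVle_trans {U V W : List Bool} (h1 : pvVle U V) (h2 : pvVle V W) : pvVle U W := by
  induction h1 generalizing W with
  | nil => cases h2; exact List.Forall₂.nil
  | cons hab _ ih =>
      cases h2 with
      | cons hbc htail => exact List.Forall₂.cons (fun h => hbc (hab h)) (ih htail)
theorem pvVle_set (V : List Bool) (k : Nat) : pvVle V (V.set k true) := by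
  induction V generalizing k with
  | nil => exact List.Forall₂.nil
  | cons a t ih =>
      cases k with
      | zero => exact List.Forall₂.cons (fun _ => rfl) (pvVle_refl t)
      | succ k => exact List.Forall₂.cons (fun h => h) (ih k)
theorem pvVle_getD {V W : List Bool} (h : pvVle V W) (j : Nat)
    (hj : V.getD j false = true) : W.getD j false = true := by
  induction h generalizing j with
  | nil => simp at hj
  | cons hab _ ih =>
      cases j with
      | zero => simpa using hab (by simpa using hj)
      | succ j => simpa using ih j (by simpa using hj)
theorem pvVle_length {V W : List Bool} (h : pvVle V W) : V.length = W.length := h.length_eq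
theorem pvVle_count {V W : List Bool} (h : pvVle V W) : W.count false ≤ V.count false := by
  induction h with
  | nil => simp
  | cons hab htail ih =>
      rename_i a b _ _
      cases a <;> cases b <;> simp_all <;> omega
theorem pvVle_of_getD (V W : List Bool) (hl : V.length = W.length)
    (h : ∀ j, V.getD j false = true → W.getD j false = true) : pvVle V W := by
  induction V generalizing W with
  | nil => cases W with
      | nil => exact List.Forall₂.nil
      | cons b u => simp at hl
  | cons a t ih =>
      cases W with
      | nil => simp at hl
      | cons b u =>
          refine List.Forall₂.cons ?_ (ih u (by simpa using hl) ?_)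
          · intro ha; have := h 0 (by simpa using ha); simpa using this
          · intro j hj; have := h (j+1) (by simpa using hj); simpa using this
theorem pvVle_count_lt {V W : List Bool} (h : pvVle V W) (hne : V ≠ W) :
    W.count false < V.count false := by
  induction h with
  | nil => exact absurd rfl hne
  | cons hab htail ih =>
      rename_i a b t u
      have hc := pvVle_count htail
      by_cases he : a = b
      · subst he
        have htu : t ≠ u := fun h => hne (by rw [h])
        have := ih htu
        cases a <;> simp [List.count_cons] <;> omega
      · cases a <;> cases b <;> simp_all [List.count_cons] <;> omega
theorem pv_count_set_true (V : List Bool) (k : Nat) (hk : k < V.length)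
    (hf : V.getD k false = false) :
    (V.set k true).count false + 1 = V.count false := by
  induction V generalizing k with
  | nil => simp at hk
  | cons a t ih =>
      cases k with
      | zero => cases a <;> simp_all
      | succ k =>
          have := ih k (by simpa using hk) (by simpa using hf)
          cases a <;> simp [List.set] <;> omega
theorem pv_getD_set_self {α : Type} (l : List α) (k : Nat) (a d : α) (h : k < l.length) :
    (l.set k a).getD k d = a := by
  simp [List.getD_eq_getElem?_getD, List.getElem?_set_self', List.getElem?_eq_getElem h]
theorem pv_getD_set_ne {α : Type} (l : List α) (j k : Nat) (a d : α) (h : j ≠ k) :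
    (l.set k a).getD j d = l.getD j d := by
  simp [List.getD_eq_getElem?_getD, List.getElem?_set_ne (by omega : k ≠ j)]
theorem pv_vm_set_elim (V : List Bool) (k x : Nat)
    (h : (V.set k true).getD x false = true) : x = k ∨ V.getD x false = true := by
  by_cases hxk : x = k
  · exact Or.inl hxk
  · exact Or.inr (by rwa [pv_getD_set_ne V x k true false hxk] at h)
theorem pv_vm_set_self (V : List Bool) (k : Nat) (h : k < V.length) :
    (V.set k true).getD k false = true := pv_getD_set_self V k true false h

theorem pvDfsV_main (g : List (List Int)) (n : Nat) :
    ∀ fuel m V, V.length = n → V.count false < fuel →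
      pvVle V (pvDfsV g n fuel m V) ∧
      (∀ x, (pvDfsV g n fuel m V).getD x false = true → V.getD x false = true ∨
        ∀ k, pvE g n x k → (pvDfsV g n fuel m V).getD k false = true) ∧
      (∀ k, pvE g n m k → (pvDfsV g n fuel m V).getD k false = true) := by
  intro fuel
  induction fuel with
  | zero => intro m V _ hc; omega
  | succ f IH =>
    intro m V hl hc
    have key : ∀ l : List Nat, (∀ k ∈ l, k < n) → ∀ W, W.length = n →
        W.count false ≤ V.count false →
        (pvVle W (l.foldl (fun W k =>
            if (g.getD m []).getD k 0 = 1 ∧ W.getD k false = false then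
              pvDfsV g n f k (W.set k true) else W) W) ∧
         (l.foldl (fun W k =>
            if (g.getD m []).getD k 0 = 1 ∧ W.getD k false = false then
              pvDfsV g n f k (W.set k true) else W) W).length = n ∧
         (l.foldl (fun W k =>
            if (g.getD m []).getD k 0 = 1 ∧ W.getD k false = false then
              pvDfsV g n f k (W.set k true) else W) W).count false ≤ V.count false ∧
         (∀ x, (l.foldl (fun W k =>
            if (g.getD m []).getD k 0 = 1 ∧ W.getD k false = false then
              pvDfsV g n f k (W.set k true) else W) W).getD x false = true →
            W.getD x false = true ∨ ∀ j, pvE g n x j → (l.foldl (fun W k =>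
            if (g.getD m []).getD k 0 = 1 ∧ W.getD k false = false then
              pvDfsV g n f k (W.set k true) else W) W).getD j false = true) ∧
         (∀ k ∈ l, (g.getD m []).getD k 0 = 1 → (l.foldl (fun W k =>
            if (g.getD m []).getD k 0 = 1 ∧ W.getD k false = false then
              pvDfsV g n f k (W.set k true) else W) W).getD k false = true)) := by
      intro l
      induction l with
      | nil =>
          intro _ W hWl hWc
          exact ⟨pvVle_refl W, hWl, hWc, fun x hx => Or.inl hx, by simp⟩
      | cons k l ihl =>
          intro hmem W hWl hWc
          have hk_lt : k < n := hmem k (List.mem_cons_self)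
          by_cases hcond : (g.getD m []).getD k 0 = 1 ∧ W.getD k false = false
          · -- branch taken
            have hkW : k < W.length := by omega
            have hcnt := pv_count_set_true W k hkW hcond.2
            have hrec := IH k (W.set k true) (by simp [hWl]) (by omega)
            set W1 := pvDfsV g n f k (W.set k true) with hW1
            have hvle1 : pvVle W W1 := pvVle_trans (pvVle_set W k) hrec.1
            have hlen1 : W1.length = n := by
              rw [← pvVle_length hrec.1]; simp [hWl]
            have hcnt1 : W1.count false ≤ V.count false := by
              have := pvVle_count hrec.1; omega
            have hmk1 : W1.getD k false = true :=
              pvVle_getD hrec.1 k (pv_vm_set_self W k hkW)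
            have hQ1 : ∀ x, W1.getD x false = true →
                W.getD x false = true ∨ ∀ j, pvE g n x j → W1.getD j false = true := by
              intro x hx
              by_cases hxW : W.getD x false = true
              · exact Or.inl hxW
              · by_cases hxs : (W.set k true).getD x false = true
                · rcases pv_vm_set_elim W k x hxs with hxk | hW
                  · subst hxk
                    exact Or.inr (fun j hj => hrec.2.2 j hj)
                  · exact absurd hW hxW
                · rcases hrec.2.1 x hx with h | h
                  · exact absurd h hxs
                  · exact Or.inr h
            have hstep : (List.foldl (fun W k =>
                if (g.getD m []).getD k 0 = 1 ∧ W.getD k false = false then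
                  pvDfsV g n f k (W.set k true) else W) W (k :: l)) =
                (List.foldl (fun W k =>
                if (g.getD m []).getD k 0 = 1 ∧ W.getD k false = false then
                  pvDfsV g n f k (W.set k true) else W) W1 l) := by
              simp only [List.foldl_cons]; rw [if_pos hcond]
            rw [hstep]
            obtain ⟨hvle2, hlen2, hcnt2, hQ2, hmk2⟩ :=
              ihl (fun k hk => hmem k (List.mem_cons_of_mem _ hk)) W1 hlen1 hcnt1
            refine ⟨pvVle_trans hvle1 hvle2, hlen2, hcnt2, ?_, ?_⟩
            · intro x hx
              rcases hQ2 x hx with hx1 | hsucc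
              · rcases hQ1 x hx1 with hxW | hsucc1
                · exact Or.inl hxW
                · exact Or.inr (fun j hj => pvVle_getD hvle2 j (hsucc1 j hj))
              · exact Or.inr hsucc
            · intro k' hk' hedge
              rcases List.mem_cons.1 hk' with rfl | hk'l
              · exact pvVle_getD hvle2 k' hmk1
              · exact hmk2 k' hk'l hedge
          · -- branch not taken
            have hstep : (List.foldl (fun W k =>
                if (g.getD m []).getD k 0 = 1 ∧ W.getD k false = false then
                  pvDfsV g n f k (W.set k true) else W) W (k :: l)) =
                (List.foldl (fun W k =>
                if (g.getD m []).getD k 0 = 1 ∧ W.getD k false = false then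
                  pvDfsV g n f k (W.set k true) else W) W l) := by
              simp only [List.foldl_cons]; rw [if_neg hcond]
            rw [hstep]
            obtain ⟨hvle2, hlen2, hcnt2, hQ2, hmk2⟩ :=
              ihl (fun k hk => hmem k (List.mem_cons_of_mem _ hk)) W hWl hWc
            refine ⟨hvle2, hlen2, hcnt2, hQ2, ?_⟩
            intro k' hk' hedge
            rcases List.mem_cons.1 hk' with rfl | hk'l
            · have : W.getD k' false = true := by
                rcases Bool.eq_false_or_eq_true (W.getD k' false) with h | h
                · exact h
                · exact absurd ⟨hedge, h⟩ hcond
              exact pvVle_getD hvle2 k' this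
            · exact hmk2 k' hk'l hedge
    obtain ⟨h1, h2, h3, h4, h5⟩ := key (List.range n) (fun k hk => List.mem_range.1 hk) V hl le_rfl
    refine ⟨h1, h4, ?_⟩
    intro k hk
    exact h5 k (List.mem_range.2 hk.2) hk.1

theorem pvDfsV_sound (g : List (List Int)) (n : Nat) :
    ∀ fuel m V x, (pvDfsV g n fuel m V).getD x false = true →
      V.getD x false = true ∨ Relation.TransGen (pvE g n) m x := by
  intro fuel
  induction fuel with
  | zero => intro m V x hx; exact Or.inl hx
  | succ f IH =>
    intro m V x hx
    have key : ∀ l : List Nat, (∀ k ∈ l, k < n) → ∀ W x,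
        (l.foldl (fun W k =>
          if (g.getD m []).getD k 0 = 1 ∧ W.getD k false = false then
            pvDfsV g n f k (W.set k true) else W) W).getD x false = true →
        W.getD x false = true ∨ Relation.TransGen (pvE g n) m x := by
      intro l
      induction l with
      | nil => intro _ W x hx; exact Or.inl hx
      | cons k l ihl =>
          intro hmem W x hx
          have hk_lt : k < n := hmem k (List.mem_cons_self)
          rw [List.foldl_cons] at hx
          by_cases hcond : (g.getD m []).getD k 0 = 1 ∧ W.getD k false = false
          · rw [if_pos hcond] at hx
            rcases ihl (fun k hk => hmem k (List.mem_cons_of_mem _ hk)) _ x hx with h | h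
            · rcases IH k (W.set k true) x h with h2 | h2
              · rcases pv_vm_set_elim W k x h2 with rfl | h3
                · exact Or.inr (Relation.TransGen.single ⟨hcond.1, hk_lt⟩)
                · exact Or.inl h3
              · exact Or.inr (Relation.TransGen.head ⟨hcond.1, hk_lt⟩ h2)
            · exact Or.inr h
          · rw [if_neg hcond] at hx
            exact ihl (fun k hk => hmem k (List.mem_cons_of_mem _ hk)) _ x hx
    exact key (List.range n) (fun k hk => List.mem_range.1 hk) V x hx

theorem pv_vm_replicate (n j : Nat) : (List.replicate n false).getD j false = false := by
  simp [List.getD_eq_getElem?_getD, List.getElem?_replicate]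
  split <;> rfl

theorem pvDfsV_char (g : List (List Int)) (n : Nat) (s : Nat) (j : Nat) :
    (pvDfsV g n (n+1) s (List.replicate n false)).getD j false = true ↔
      Relation.TransGen (pvE g n) s j := by
  have hmain := pvDfsV_main g n (n+1) s (List.replicate n false)
    (List.length_replicate) (by simp)
  constructor
  · intro h
    rcases pvDfsV_sound g n (n+1) s (List.replicate n false) j h with h0 | htg
    · rw [pv_vm_replicate] at h0; exact absurd h0 (by simp)
    · exact htg
  · intro h
    induction h with
    | single hb => exact hmain.2.2 _ hb
    | tail hab hbc ih =>
        rcases hmain.2.1 _ ih with h0 | hs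
        · rw [pv_vm_replicate] at h0; exact absurd h0 (by simp)
        · exact hs _ hbc

-- B-side boolean model of one saturation round and of the fixpoint loop
def pvBstep (g : List (List Int)) (n s : Nat) (V : List Bool) : List Bool :=
  (List.range n).map (fun j =>
    V.getD j false || ((g.getD s []).getD j 0 == 1) ||
      ((List.range n).any fun i => V.getD i false && ((g.getD i []).getD j 0 == 1)))
def pvBfix (g : List (List Int)) (n s : Nat) : Nat → List Bool → List Bool
  | 0, V => V
  | f+1, V =>
      if pvBstep g n s V = V then V
      else pvBfix g n s f (pvBstep g n s V)

def pvRender (V : List Bool) : List Int := V.map (fun b => if b then 1 else 0)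

theorem pv_render_getD (V : List Bool) (j : Nat) :
    (pvRender V).getD j 0 = if V.getD j false then 1 else 0 := by
  unfold pvRender
  rcases h : V[j]? with _ | b
  · simp [List.getD_eq_getElem?_getD, h]
  · simp [List.getD_eq_getElem?_getD, h]

theorem pv_render_inj {V W : List Bool} (h : pvRender V = pvRender W) : V = W := by
  refine List.map_injective_iff.2 ?_ h
  intro a b hab
  cases a <;> cases b <;> simp_all

theorem pv_render_map {α : Type} (l : List α) (f : α → Bool) :
    pvRender (l.map f) = l.map (fun x => if f x then (1 : Int) else 0) := by
  unfold pvRender; rw [List.map_map]; rfl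

theorem pv_render_one (b : Bool) : ((if b then (1 : Int) else 0) = 1) ↔ b = true := by
  cases b <;> simp
theorem pv_render_beq (b : Bool) : ((if b then (1 : Int) else 0) == 1) = b := by
  cases b <;> decide

theorem pv_step_render (g : List (List Int)) (start : Int) (n s : Nat) (V : List Bool)
    (hrow : PySem.List.pyGetD g start [] = g.getD s []) :
    pvStepB g start n (pvRender V) = pvRender (pvBstep g n s V) := by
  unfold pvStepB pvBstep
  rw [pv_render_map]
  apply List.map_congr_left
  intro j _
  rw [hrow]
  simp only [pv_render_getD, pv_render_beq, pv_render_one, Bool.or_eq_true,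
    Bool.and_eq_true, List.any_eq_true, List.mem_range, beq_iff_eq, or_assoc]

theorem pv_fix_render (g : List (List Int)) (start : Int) (n s : Nat)
    (hrow : PySem.List.pyGetD g start [] = g.getD s []) :
    ∀ f V, pvFixB g start n f (pvRender V) = pvRender (pvBfix g n s f V) := by
  intro f
  induction f with
  | zero => intro V; rfl
  | succ f IH =>
      intro V
      simp only [pvFixB, pvBfix, pv_step_render g start n s V hrow]
      by_cases h : pvBstep g n s V = V
      · rw [if_pos (by rw [h]), if_pos h]
      · rw [if_neg (fun hr => h (pv_render_inj hr)), if_neg h]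
        exact IH (pvBstep g n s V)

theorem pv_map_range_getD {α : Type} (n : Nat) (f : Nat → α) (j : Nat) (d : α) :
    ((List.range n).map f).getD j d = if j < n then f j else d := by
  by_cases h : j < n
  · simp [List.getD_eq_getElem?_getD, List.getElem?_range, h]
  · simp [List.getD_eq_getElem?_getD, List.getElem?_range, h]

theorem pv_bstep_getD (g : List (List Int)) (n s : Nat) (V : List Bool) (j : Nat) :
    (pvBstep g n s V).getD j false = true ↔
      j < n ∧ (V.getD j false = true ∨ (g.getD s []).getD j 0 = 1 ∨
        ∃ i, i < n ∧ V.getD i false = true ∧ (g.getD i []).getD j 0 = 1) := by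
  unfold pvBstep
  rw [pv_map_range_getD]
  by_cases h : j < n
  · simp only [if_pos h, Bool.or_eq_true, Bool.and_eq_true, List.any_eq_true,
      List.mem_range, beq_iff_eq]
    constructor
    · rintro ((hv | he) | ⟨i, hin, hi, hedge⟩)
      · exact ⟨h, Or.inl hv⟩
      · exact ⟨h, Or.inr (Or.inl he)⟩
      · exact ⟨h, Or.inr (Or.inr ⟨i, hin, hi, hedge⟩)⟩
    · rintro ⟨_, hv | he | ⟨i, hin, hi, hedge⟩⟩
      · exact Or.inl (Or.inl hv)
      · exact Or.inl (Or.inr he)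
      · exact Or.inr ⟨i, hin, hi, hedge⟩
  · simp [h]

theorem pv_bstep_len (g : List (List Int)) (n s : Nat) (V : List Bool) :
    (pvBstep g n s V).length = n := by simp [pvBstep]

theorem pv_bstep_mono (g : List (List Int)) (n s : Nat) (V : List Bool)
    (hV : V.length = n) : pvVle V (pvBstep g n s V) := by
  refine pvVle_of_getD V _ (by rw [hV, pv_bstep_len]) ?_
  intro j hj
  have hjn : j < n := by
    by_contra hge
    rw [List.getD_eq_default _ _ (by omega)] at hj
    exact absurd hj (by simp)
  exact (pv_bstep_getD g n s V j).2 ⟨hjn, Or.inl hj⟩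

theorem pv_bfix_fix (g : List (List Int)) (n s : Nat) :
    ∀ f V, V.length = n → V.count false < f →
      pvBstep g n s (pvBfix g n s f V) = pvBfix g n s f V ∧
      (pvBfix g n s f V).length = n := by
  intro f
  induction f with
  | zero => intro V _ hc; omega
  | succ f IH =>
      intro V hl hc
      simp only [pvBfix]
      by_cases h : pvBstep g n s V = V
      · rw [if_pos h]; exact ⟨h, hl⟩
      · rw [if_neg h]
        refine IH (pvBstep g n s V) (pv_bstep_len g n s V) ?_
        have := pvVle_count_lt (pv_bstep_mono g n s V hl) (fun he => h he.symm)
        omega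

theorem pv_bfix_sound (g : List (List Int)) (n s : Nat) :
    ∀ f V, (∀ j, V.getD j false = true → Relation.TransGen (pvE g n) s j) →
      ∀ j, (pvBfix g n s f V).getD j false = true → Relation.TransGen (pvE g n) s j := by
  intro f
  induction f with
  | zero => intro V hV j; exact hV j
  | succ f IH =>
      intro V hV j
      simp only [pvBfix]
      by_cases h : pvBstep g n s V = V
      · rw [if_pos h]; exact hV j
      · rw [if_neg h]
        refine IH (pvBstep g n s V) ?_ j
        intro j' hj'
        obtain ⟨hjn, hcase⟩ := (pv_bstep_getD g n s V j').1 hj'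
        rcases hcase with hv | he | ⟨i, _, hi, hedge⟩
        · exact hV j' hv
        · exact Relation.TransGen.single ⟨he, hjn⟩
        · exact (hV i hi).tail ⟨hedge, hjn⟩

theorem pv_transGen_lt (g : List (List Int)) (n s : Nat) :
    ∀ b, Relation.TransGen (pvE g n) s b → b < n := by
  intro b h
  induction h with
  | single h => exact h.2
  | tail _ h _ => exact h.2

theorem pv_bfix_char (g : List (List Int)) (n s : Nat) (j : Nat) :
    (pvBfix g n s (n+1) (List.replicate n false)).getD j false = true ↔
      Relation.TransGen (pvE g n) s j := by
  obtain ⟨hfix, hlen⟩ := pv_bfix_fix g n s (n+1) (List.replicate n false)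
    (List.length_replicate) (by simp)
  constructor
  · exact pv_bfix_sound g n s (n+1) (List.replicate n false)
      (fun j hj => by rw [pv_vm_replicate] at hj; exact absurd hj (by simp)) j
  · intro h
    induction h with
    | single hb =>
        rw [← hfix]
        exact (pv_bstep_getD g n s _ _).2 ⟨hb.2, Or.inr (Or.inl hb.1)⟩
    | tail hab hbc ih =>
        rename_i b c
        have hbn : b < n := pv_transGen_lt g n s b hab
        rw [← hfix]
        exact (pv_bstep_getD g n s _ _).2 ⟨hbc.2, Or.inr (Or.inr ⟨b, hbn, ih, hbc.1⟩)⟩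

theorem pvV_eq (g : List (List Int)) (n : Nat) (s : Nat) :
    pvDfsV g n (n+1) s (List.replicate n false) =
      pvBfix g n s (n+1) (List.replicate n false) := by
  have hlA : (pvDfsV g n (n+1) s (List.replicate n false)).length = n := by
    have := pvVle_length (pvDfsV_main g n (n+1) s (List.replicate n false)
      (List.length_replicate) (by simp)).1
    simp at this; omega
  have hlB : (pvBfix g n s (n+1) (List.replicate n false)).length = n :=
    (pv_bfix_fix g n s (n+1) (List.replicate n false) (List.length_replicate) (by simp)).2
  apply List.ext_getElem (by omega)
  intro i h1 h2
  apply Bool.coe_iff_coe.mp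
  rw [← List.getD_eq_getElem _ false h1, ← List.getD_eq_getElem _ false h2]
  exact (pvDfsV_char g n s i).trans (pv_bfix_char g n s i).symm

def pvIdx (i : Int) (n : Nat) : Nat := if i < 0 then (i + n).toNat else i.toNat
theorem pvIdx_getD {α : Type} (l : List α) (i : Int) (d : α)
    (h1 : -(l.length : Int) ≤ i) (h2 : i < (l.length : Int)) :
    PySem.List.pyGetD l i d = l.getD (pvIdx i l.length) d := by
  unfold PySem.List.pyGetD PySem.List.pyGet? PySem.List.pyIdx? pvIdx
  by_cases h : 0 ≤ i
  · rw [if_pos h, if_pos h2, if_neg (by omega)]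
    simp [List.getD_eq_getElem?_getD]
  · rw [if_neg h, if_pos h1, if_pos (by omega)]
    have : l.length - (-i).toNat = (i + l.length).toNat := by omega
    simp [this, List.getD_eq_getElem?_getD]
theorem pvIdx_set {α : Type} (l : List α) (i : Int) (v : α)
    (h1 : -(l.length : Int) ≤ i) (h2 : i < (l.length : Int)) :
    PySem.List.pySetD l i v = l.set (pvIdx i l.length) v := by
  unfold PySem.List.pySetD PySem.List.pySet? PySem.List.pyIdx? pvIdx
  by_cases h : 0 ≤ i
  · rw [if_pos h, if_pos h2, if_neg (by omega)]
    rfl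
  · rw [if_neg h, if_pos h1, if_pos (by omega)]
    have : l.length - (-i).toNat = (i + l.length).toNat := by omega
    simp [this]
theorem pvIdx_lt (i : Int) (n : Nat) (h1 : -(n : Int) ≤ i) (h2 : i < (n : Int)) :
    pvIdx i n < n := by
  unfold pvIdx; split <;> omega

def pvPack (n s : Nat) (V : List Bool) : List Bool × List (List Int) :=
  (V, (List.replicate n (List.replicate n (0 : Int))).set s (pvRender V))

theorem pvRange_cast (n : Nat) :
    PySem.List.pyRange 0 (n : Int) 1 = (List.range n).map (fun k : Nat => (k : Int)) := by
  rw [PySem.List.pyRange_one]; simp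

theorem pvRender_set (V : List Bool) (k : Nat) :
    (pvRender V).set k 1 = pvRender (V.set k true) := by
  unfold pvRender; rw [List.map_set]; simp

theorem pvPackA (g : List (List Int)) (n : Nat) (start : Int) (s : Nat)
    (hs1 : -(n : Int) ≤ start) (hs2 : start < (n : Int)) (hse : s = pvIdx start n) :
    ∀ fuel (node : Int) (m : Nat) V,
      PySem.List.pyGetD g node [] = g.getD m [] →
      pvDfsA g n start fuel node (pvPack n s V) = pvPack n s (pvDfsV g n fuel m V) := by
  have hsn : s < n := hse ▸ pvIdx_lt start n hs1 hs2
  have hMget : ∀ (M : List (List Int)), M.length = n →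
      PySem.List.pyGetD M start [] = M.getD s [] := by
    intro M hM
    rw [pvIdx_getD M start [] (by rw [hM]; exact hs1) (by rw [hM]; exact hs2), hM, ← hse]
  have hMset : ∀ (M : List (List Int)) (v : List Int), M.length = n →
      PySem.List.pySetD M start v = M.set s v := by
    intro M v hM
    rw [pvIdx_set M start v (by rw [hM]; exact hs1) (by rw [hM]; exact hs2), hM, ← hse]
  intro fuel
  induction fuel with
  | zero => intro node m V _; rfl
  | succ f IH =>
    intro node m V Hnode
    show (PySem.List.pyRange 0 (n : Int) 1).foldl _ (pvPack n s V) = _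
    rw [pvRange_cast, List.foldl_map]
    show (List.range n).foldl _ (pvPack n s V) =
      pvPack n s ((List.range n).foldl _ V)
    generalize (List.range n) = l
    induction l generalizing V with
    | nil => rfl
    | cons k l ihl =>
        simp only [List.foldl_cons, pvPack]
        by_cases hcond : (g.getD m []).getD k 0 = 1 ∧ V.getD k false = false
        · rw [if_pos (by rw [Hnode]; simpa using hcond), if_pos hcond]
          have harg : (PySem.List.pySetD V ((k : Nat) : Int) true,
              PySem.List.pySetD ((List.replicate n (List.replicate n (0 : Int))).set s (pvRender V)) start
                (PySem.List.pySetD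
                  (PySem.List.pyGetD ((List.replicate n (List.replicate n (0 : Int))).set s (pvRender V)) start [])
                  ((k : Nat) : Int) 1)) =
              pvPack n s (V.set k true) := by
            rw [hMget _ (by simp), hMset _ _ (by simp)]
            rw [pv_getD_set_self _ s (pvRender V) [] (by simpa using hsn)]
            rw [PySem.List.pySetD_natCast, PySem.List.pySetD_natCast]
            rw [List.set_set, pvRender_set]
            rfl
          rw [harg, IH ((k : Nat) : Int) k (V.set k true) (by simp)]
          exact ihl (pvDfsV g n f k (V.set k true))
        · rw [if_neg (by rw [Hnode]; simpa using hcond), if_neg hcond]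
          exact ihl V

theorem pv_final (g : List (List Int)) (start : Int)
    (hPre : g = [] ∨ (-(g.length : Int) ≤ start ∧ start < (g.length : Int) ∧
      ∀ row ∈ g, g.length ≤ row.length)) :
    find_reachable_vertices g start = find_reachable_vertices_alt g start := by
  rcases hPre with rfl | ⟨hs1, hs2, _⟩
  · simp [find_reachable_vertices, find_reachable_vertices_alt, pvDfsA, pvRange_cast]
  · have hg := pvIdx_getD g start [] hs1 hs2
    have hn : g.length ≠ 0 := by
      intro h; rw [h] at hs1 hs2; simp at hs1 hs2; omega
    have hA := pvPackA g g.length start (pvIdx start g.length) hs1 hs2 rfl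
      (g.length+1) start (pvIdx start g.length) (List.replicate g.length false) hg
    have hpack0 : (List.replicate g.length false,
        List.replicate g.length (List.replicate g.length (0 : Int))) =
        pvPack g.length (pvIdx start g.length) (List.replicate g.length false) := by
      unfold pvPack pvRender
      rw [List.map_replicate]
      simp
    have hzero : List.replicate g.length (0 : Int) =
        pvRender (List.replicate g.length false) := by
      unfold pvRender; rw [List.map_replicate]; simp
    show (pvDfsA g g.length start (g.length+1) start
        (List.replicate g.length false,
         List.replicate g.length (List.replicate g.length 0))).2 =
      (if (List.replicate g.length (List.replicate g.length (0 : Int))) ≠ [] then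
        PySem.List.pySetD (List.replicate g.length (List.replicate g.length (0 : Int))) start
          (pvFixB g start g.length (g.length+1) (List.replicate g.length (0 : Int)))
       else List.replicate g.length (List.replicate g.length (0 : Int)))
    rw [hpack0, hA, if_pos (by simpa [List.replicate_eq_nil_iff] using hn)]
    rw [hzero, pv_fix_render g start g.length (pvIdx start g.length) hg]
    rw [pvIdx_set _ _ _ (by simpa using hs1) (by simpa using hs2)]
    simp only [pvPack, List.length_replicate]
    rw [pvV_eq g g.length (pvIdx start g.length), ← hzero]

-- ===== VERDICT (by name: the statement is the Claim_ definition above) =====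
theorem find_reachable_vertices_spec : Claim_equal_find_reachable_vertices := by
  intro graph start _ hPre
  unfold Spec_find_reachable_vertices
  exact pv_final graph start hPre
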